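-- pv_equiv track=rewrite | github.com/Quick-One/CC | CF_Quick-One/good_bye_2023/B.py | func
-- ===== SOURCE A (Python) =====
-- from math import gcd
--
-- def func(a,b):
--     if a == 1:
--         return b * b
--     d = gcd(a,b)
--     if d == 1:
--         return a * b
--     a //= d
--     b //= d
--     ans = d * func(a,b)
--     return ans
-- ===== SOURCE B (Python) =====
-- from math import gcd
--
-- def func(a, b):
--     # A's recursion has depth at most one: after dividing a and b by
--     # d = gcd(a, b) >= 2, gcd(a//d, b//d) = gcd(a, b)//d = 1, so the
--     # recursive call always hits a base case.  B therefore computes the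
--     # answer with straight-line arithmetic, no loop or recursion.
--     if a == 1:
--         return b * b
--     d = gcd(a, b)
--     if d == 1:
--         return a * b
--     a2 = a // d
--     b2 = b // d
--     if a2 == 1:
--         return d * b2 * b2
--     return d * a2 * b2
-- ===== Notes on version B (the rewrite author's own statement) =====
-- stated objective: simpler
-- what changed: Replaced the recursion by straight-line arithmetic: since gcd(a//d, b//d) = 1 after dividing by d = gcd(a,b) >= 2, A's recursion has depth at most one, so B unfolds it into a single branch computing d*b2*b2 or d*a2*b2 directly.
-- outside the precondition, e.g. on func(0, 0): A raises ZeroDivisionError, B raises ZeroDivisionError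
import Mathlib
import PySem

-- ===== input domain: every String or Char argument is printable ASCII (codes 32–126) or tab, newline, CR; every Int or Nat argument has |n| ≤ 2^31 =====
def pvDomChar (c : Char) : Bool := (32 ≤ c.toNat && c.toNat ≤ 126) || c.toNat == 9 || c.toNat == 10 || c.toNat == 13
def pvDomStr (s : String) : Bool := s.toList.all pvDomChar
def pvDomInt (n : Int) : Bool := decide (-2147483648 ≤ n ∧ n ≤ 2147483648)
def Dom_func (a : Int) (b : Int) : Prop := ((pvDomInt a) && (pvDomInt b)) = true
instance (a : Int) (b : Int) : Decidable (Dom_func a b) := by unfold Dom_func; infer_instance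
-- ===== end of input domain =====

-- B replaces A's recursion by straight-line arithmetic: after one division by
-- d = gcd(a,b) ≥ 2 the two numbers are coprime, so A's recursion has depth ≤ 1
-- and can be unfolded into a single branch (objective: simpler, no recursion).

-- ===== PORT A =====
-- recursive body of A; fuel exhaustion (unreachable inside Pre_func) returns 0
def funcRec : Nat → Int → Int → Int
  | 0, _, _ => 0
  | f + 1, a, b =>
    if a = 1 then b * b
    else
      let d : Int := Int.gcd a b
      if d = 1 then a * b
      else d * funcRec f (PySem.Int.floordiv a d) (PySem.Int.floordiv b d)

def func (a : Int) (b : Int) : Int := funcRec (a.natAbs + b.natAbs + 1) a b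

-- ===== PORT B =====
def func_alt (a : Int) (b : Int) : Int :=
  if a = 1 then b * b
  else
    let d : Int := Int.gcd a b
    if d = 1 then a * b
    else
      let a2 : Int := PySem.Int.floordiv a d
      let b2 : Int := PySem.Int.floordiv b d
      if a2 = 1 then d * b2 * b2 else d * a2 * b2

-- ===== PRECONDITION & SPEC =====
-- Pre_ excludes only (0, 0), where Python's gcd is 0 and `a //= d` raises ZeroDivisionError.
def Pre_func (a : Int) (b : Int) : Prop := ¬ (a = 0 ∧ b = 0)
instance (a : Int) (b : Int) : Decidable (Pre_func a b) := by unfold Pre_func; infer_instance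
def pvWitness_func : Int × Int := (2, 4)

def Spec_func (a : Int) (b : Int) (out : Int) : Prop := out = func_alt a b
instance (a : Int) (b : Int) (out : Int) : Decidable (Spec_func a b out) := by unfold Spec_func; infer_instance

-- ===== CLAIM (what is proved, stated in full; the proofs are below) =====
def Claim_equal_func : Prop := ∀ (a : Int) (b : Int), Dom_func a b → Pre_func a b → Spec_func a b (func a b)

-- ===== LEMMAS AND PROOFS =====

-- exact floor division: on a divisor ≥ 1, floordiv agrees with Euclidean `/`
theorem floordiv_pos (a d : Int) (hd : 0 < d) : PySem.Int.floordiv a d = a / d :=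
  PySem.Int.floordiv_eq_ediv_of_pos hd

-- the key fact: after dividing both numbers by their gcd ≥ 1, the gcd is 1
theorem gcd_after_div (a b : Int) (h0 : 0 < Int.gcd a b) :
    Int.gcd (PySem.Int.floordiv a (Int.gcd a b)) (PySem.Int.floordiv b (Int.gcd a b)) = 1 := by
  have hd : (0 : Int) < (Int.gcd a b : Int) := by exact_mod_cast h0
  rw [floordiv_pos a _ hd, floordiv_pos b _ hd]
  exact Int.gcd_div_gcd_div_gcd h0

-- A's recursion has depth ≤ 1 (given fuel ≥ 2), and unfolds to func_alt
theorem funcRec_eq_alt (f : Nat) (a b : Int) (hab : ¬ (a = 0 ∧ b = 0)) :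
    funcRec (f + 2) a b = func_alt a b := by
  simp only [funcRec, func_alt]
  by_cases h1 : a = 1
  · simp [h1]
  · simp only [if_neg h1]
    by_cases h2 : ((Int.gcd a b : Nat) : Int) = 1
    · simp [h2]
    · have hg0 : 0 < Int.gcd a b := by
        rcases Nat.eq_zero_or_pos (Int.gcd a b) with h | h
        · exact absurd (Int.gcd_eq_zero_iff.mp h) hab
        · exact h
      have hcop := gcd_after_div a b hg0
      simp only [if_neg h2]
      by_cases h3 : PySem.Int.floordiv a (Int.gcd a b) = 1
      · simp only [if_pos h3, hcop]
        ring
      · simp only [if_neg h3, hcop]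
        norm_num
        ring

-- ===== VERDICT (by name: the statement is the Claim_ definition above) =====
theorem func_spec : Claim_equal_func := by
  intro a b _ hpre
  unfold Spec_func func
  unfold Pre_func at hpre
  have h : a.natAbs + b.natAbs + 1 = (a.natAbs + b.natAbs - 1) + 2 := by omega
  rw [h, funcRec_eq_alt _ _ _ hpre]
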